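-- pv_equiv track=rewrite | github.com/DebjyotiRay/hiring_system | orchestrator.py | _categorize_roles
-- ===== SOURCE A (Python) =====
-- from typing import List, Dict, Tuple
--
-- def _categorize_roles(roles: List[str]) -> Dict[str, int]:
--     """Categorize roles into high-level categories and count occurrences"""
--     categories = {
--         'engineering': 0,
--         'management': 0,
--         'legal': 0,
--         'finance': 0,
--         'product': 0,
--         'design': 0,
--         'marketing': 0,
--         'operations': 0,
--         'data_science': 0,
--         'research': 0,
--         'other': 0
--     }
--
--     for role in roles:
--         role_lower = role.lower()
--         if any(term in role_lower for term in ['developer', 'engineer', 'stack', 'software', 'system administrator']):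
--             categories['engineering'] += 1
--         elif any(term in role_lower for term in ['manager', 'director', 'lead']):
--             categories['management'] += 1
--         elif any(term in role_lower for term in ['legal', 'attorney', 'lawyer']):
--             categories['legal'] += 1
--         elif any(term in role_lower for term in ['finance', 'financial', 'accountant']):
--             categories['finance'] += 1
--         elif any(term in role_lower for term in ['product']):
--             categories['product'] += 1
--         elif any(term in role_lower for term in ['design', 'ux', 'ui']):
--             categories['design'] += 1
--         elif any(term in role_lower for term in ['marketing', 'growth']):
--             categories['marketing'] += 1
--         elif any(term in role_lower for term in ['operations', 'operator']):
--             categories['operations'] += 1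
--         elif any(term in role_lower for term in ['data', 'scientist', 'analytics']):
--             categories['data_science'] += 1
--         elif any(term in role_lower for term in ['research', 'scientist']):
--             categories['research'] += 1
--         else:
--             categories['other'] += 1
--
--     return categories
-- ===== SOURCE B (Python) =====
-- from typing import List, Dict, Tuple
--
-- RULES = [
--     ('engineering', ['developer', 'engineer', 'stack', 'software', 'system administrator']),
--     ('management', ['manager', 'director', 'lead']),
--     ('legal', ['legal', 'attorney', 'lawyer']),
--     ('finance', ['finance', 'financial', 'accountant']),
--     ('product', ['product']),
--     ('design', ['design', 'ux', 'ui']),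
--     ('marketing', ['marketing', 'growth']),
--     ('operations', ['operations', 'operator']),
--     ('data_science', ['data', 'scientist', 'analytics']),
--     ('research', ['research', 'scientist']),
-- ]
--
-- def _categorize_roles(roles: List[str]) -> Dict[str, int]:
--     # Per-category filter cascade: each category, in priority order, counts and
--     # removes its matches from the pool of lowercased roles; 'other' is what remains.
--     counts = {}
--     pool = [r.lower() for r in roles]
--     for cat, terms in RULES:
--         counts[cat] = len([rl for rl in pool if any(t in rl for t in terms)])
--         pool = [rl for rl in pool if not any(t in rl for t in terms)]
--     counts['other'] = len(pool)
--     return counts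
-- ===== Notes on version B (the rewrite author's own statement) =====
-- stated objective: alternative
-- what changed: Replaces the per-role elif dispatch accumulating into a pre-zeroed dict by a per-category filter cascade: for each category in priority order it counts the matching roles in a pool of lowercased roles and removes them from the pool, and 'other' is the size of what remains.
import Mathlib
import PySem

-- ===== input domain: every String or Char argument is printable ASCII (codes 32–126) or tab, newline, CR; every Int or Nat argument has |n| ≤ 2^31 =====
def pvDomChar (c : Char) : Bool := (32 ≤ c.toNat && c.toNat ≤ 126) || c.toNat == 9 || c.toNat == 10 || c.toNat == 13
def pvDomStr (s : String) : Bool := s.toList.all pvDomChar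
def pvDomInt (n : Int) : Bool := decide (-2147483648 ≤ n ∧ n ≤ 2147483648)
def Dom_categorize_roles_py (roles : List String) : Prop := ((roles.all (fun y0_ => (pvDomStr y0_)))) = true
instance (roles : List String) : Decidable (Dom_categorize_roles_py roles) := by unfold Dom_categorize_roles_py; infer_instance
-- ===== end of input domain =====

-- B replaces A's per-role elif dispatch by a per-category filter cascade over a pool
-- of lowercased roles ('alternative': same cost, a different traversal of the data).

-- ===== PORT A =====
-- literal port of A: initial dict literal, then per role the elif chain incrementing a key
def pvStepA (d : PySem.Dict String Int) (role : String) : PySem.Dict String Int :=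
  let rl := PySem.Str.lower role
  if ["developer", "engineer", "stack", "software", "system administrator"].any (fun t => PySem.Str.isIn t rl) then
    d.modify "engineering" 0 (· + 1)
  else if ["manager", "director", "lead"].any (fun t => PySem.Str.isIn t rl) then
    d.modify "management" 0 (· + 1)
  else if ["legal", "attorney", "lawyer"].any (fun t => PySem.Str.isIn t rl) then
    d.modify "legal" 0 (· + 1)
  else if ["finance", "financial", "accountant"].any (fun t => PySem.Str.isIn t rl) then
    d.modify "finance" 0 (· + 1)
  else if ["product"].any (fun t => PySem.Str.isIn t rl) then
    d.modify "product" 0 (· + 1)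
  else if ["design", "ux", "ui"].any (fun t => PySem.Str.isIn t rl) then
    d.modify "design" 0 (· + 1)
  else if ["marketing", "growth"].any (fun t => PySem.Str.isIn t rl) then
    d.modify "marketing" 0 (· + 1)
  else if ["operations", "operator"].any (fun t => PySem.Str.isIn t rl) then
    d.modify "operations" 0 (· + 1)
  else if ["data", "scientist", "analytics"].any (fun t => PySem.Str.isIn t rl) then
    d.modify "data_science" 0 (· + 1)
  else if ["research", "scientist"].any (fun t => PySem.Str.isIn t rl) then
    d.modify "research" 0 (· + 1)
  else
    d.modify "other" 0 (· + 1)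

def pvInitA : PySem.Dict String Int :=
  PySem.Dict.ofList
  [("engineering", 0), ("management", 0), ("legal", 0), ("finance", 0), ("product", 0),
   ("design", 0), ("marketing", 0), ("operations", 0), ("data_science", 0), ("research", 0),
   ("other", 0)]

def categorize_roles_py (roles : List String) : List (String × Int) :=
  (roles.foldl pvStepA pvInitA).items

-- ===== PORT B =====
-- port of Source B: the RULES table, and the per-category filter cascade over the pool
def pvRules : List (String × List String) :=
  [("engineering", ["developer", "engineer", "stack", "software", "system administrator"]),
   ("management", ["manager", "director", "lead"]),
   ("legal", ["legal", "attorney", "lawyer"]),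
   ("finance", ["finance", "financial", "accountant"]),
   ("product", ["product"]),
   ("design", ["design", "ux", "ui"]),
   ("marketing", ["marketing", "growth"]),
   ("operations", ["operations", "operator"]),
   ("data_science", ["data", "scientist", "analytics"]),
   ("research", ["research", "scientist"])]

-- any(t in rl for t in terms)
def pvMatches (terms : List String) (rl : String) : Bool :=
  terms.any (fun t => PySem.Str.isIn t rl)

-- the 'for cat, terms in RULES' loop of Source B: counts[cat] = len(matches in pool),
-- pool := non-matches; after the loop counts['other'] = len(pool)
def pvCascade : List (String × List String) → List String → PySem.Dict String Int → PySem.Dict String Int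
  | [], pool, d => d.insert "other" (pool.length : Int)
  | (cat, terms) :: rest, pool, d =>
      pvCascade rest (pool.filter (fun rl => !pvMatches terms rl))
        (d.insert cat ((pool.filter (fun rl => pvMatches terms rl)).length : Int))

def categorize_roles_py_alt (roles : List String) : List (String × Int) :=
  (pvCascade pvRules (roles.map (fun r => PySem.Str.lower r)) PySem.Dict.empty).items

-- ===== PRECONDITION & SPEC =====
def Spec_categorize_roles_py (roles : List String) (out : List (String × Int)) : Prop := out = categorize_roles_py_alt roles
instance (roles : List String) (out : List (String × Int)) : Decidable (Spec_categorize_roles_py roles out) := by unfold Spec_categorize_roles_py; infer_instance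

-- ===== CLAIM (what is proved, stated in full; the proofs are below) =====
def Claim_equal_categorize_roles_py : Prop := ∀ (roles : List String), Dom_categorize_roles_py roles → Spec_categorize_roles_py roles (categorize_roles_py roles)

-- ===== LEMMAS AND PROOFS =====

-- proof helper: the category A's elif chain assigns to a lowercased role,
-- as first-match over the rule list ("other" if none matches)
def pvPick : List (String × List String) → String → String
  | [], _ => "other"
  | (cat, terms) :: rest, rl => if pvMatches terms rl then cat else pvPick rest rl

theorem pvPick_mem (rules : List (String × List String)) (rl : String) :
    pvPick rules rl ∈ rules.map Prod.fst ++ ["other"] := by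
  induction rules with
  | nil => simp [pvPick]
  | cons p rest ih =>
      obtain ⟨cat, terms⟩ := p
      by_cases h : pvMatches terms rl
      · simp [pvPick, h]
      · have : pvPick ((cat, terms) :: rest) rl = pvPick rest rl := by simp [pvPick, h]
        rw [this]
        rcases List.mem_append.mp ih with h' | h'
        · exact List.mem_append.mpr (Or.inl (by simp; right; simpa using h'))
        · exact List.mem_append.mpr (Or.inr h')

set_option maxHeartbeats 1000000 in
theorem pvStep_eq :
    pvStepA = (fun d role => PySem.Dict.modify d (pvPick pvRules (PySem.Str.lower role)) 0 (· + 1)) := by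
  funext d role
  simp only [pvPick, pvRules, pvStepA, pvMatches]
  split_ifs <;> rfl

theorem pick_count_head (cat : String) (terms : List String) (rest : List (String × List String))
    (pool : List String) (hca : cat ∉ rest.map Prod.fst) (hco : cat ≠ "other") :
    pool.countP (fun rl => pvPick ((cat, terms) :: rest) rl == cat)
      = (pool.filter (fun rl => pvMatches terms rl)).length := by
  rw [← List.countP_eq_length_filter]
  apply List.countP_congr
  intro rl _
  by_cases h : pvMatches terms rl
  · simp [pvPick, h]
  · simp [pvPick, h]
    intro heq
    have := pvPick_mem rest rl
    rw [heq] at this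
    rcases List.mem_append.mp this with h' | h'
    · exact hca h'
    · simp at h'; exact hco h'

theorem pick_count_tail (cat : String) (terms : List String) (rest : List (String × List String))
    (pool : List String) (c : String) (hc : c ≠ cat) :
    pool.countP (fun rl => pvPick ((cat, terms) :: rest) rl == c)
      = (pool.filter (fun rl => !pvMatches terms rl)).countP (fun rl => pvPick rest rl == c) := by
  rw [List.countP_filter]
  apply List.countP_congr
  intro rl _
  by_cases h : pvMatches terms rl
  · simp [pvPick, h, Ne.symm hc]
  · simp [pvPick, h]

theorem cascade_items (rules : List (String × List String)) :
    ∀ (pool : List String) (d : PySem.Dict String Int),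
      (rules.map Prod.fst).Nodup →
      "other" ∉ rules.map Prod.fst →
      (∀ k ∈ rules.map Prod.fst, k ∉ d.keys) →
      "other" ∉ d.keys →
      (pvCascade rules pool d).items =
        d.items
          ++ rules.map (fun p => (p.1, (pool.countP (fun rl => pvPick rules rl == p.1) : Int)))
          ++ [("other", (pool.countP (fun rl => pvPick rules rl == "other") : Int))] := by
  induction rules with
  | nil =>
      intro pool d _ _ _ hod
      have hc : d.contains "other" = false := by
        rw [PySem.Dict.contains_eq_decide_mem_keys]; simp [hod]
      simp [pvCascade, PySem.Dict.items_insert_of_not_contains _ _ hc, pvPick,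
        List.countP_true]
  | cons p rest ih =>
      intro pool d hnd hor hdis hod
      obtain ⟨cat, terms⟩ := p
      rw [List.map_cons, List.nodup_cons] at hnd
      have hca : cat ∉ rest.map Prod.fst := hnd.1
      have hnd' : (rest.map Prod.fst).Nodup := hnd.2
      have hco : cat ≠ "other" := by intro h; exact hor (by simp [h])
      have hor' : "other" ∉ rest.map Prod.fst := fun h => hor (by simp [h])
      have hcd : cat ∉ d.keys := hdis cat (by simp)
      have hcc : d.contains cat = false := by
        rw [PySem.Dict.contains_eq_decide_mem_keys]; simp [hcd]
      have hkeys : (d.insert cat ((pool.filter (fun rl => pvMatches terms rl)).length : Int)).keys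
          = d.keys ++ [cat] := PySem.Dict.keys_insert_of_not_contains _ _ hcc
      rw [show pvCascade ((cat, terms) :: rest) pool d
            = pvCascade rest (pool.filter (fun rl => !pvMatches terms rl))
                (d.insert cat ((pool.filter (fun rl => pvMatches terms rl)).length : Int)) from rfl]
      rw [ih _ _ hnd' hor'
            (by intro k hk
                rw [hkeys]
                simp only [List.mem_append, List.mem_singleton]
                rintro (h | h)
                · exact hdis k (by simp [hk]) h
                · rw [h] at hk; exact hca hk)
            (by rw [hkeys]; simp [hod, Ne.symm hco])]
      rw [PySem.Dict.items_insert_of_not_contains _ _ hcc]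
      simp only [List.map_cons]
      rw [pick_count_head cat terms rest pool hca hco]
      have htail : rest.map (fun p => (p.1,
            ((pool.filter (fun rl => !pvMatches terms rl)).countP (fun rl => pvPick rest rl == p.1) : Int)))
          = rest.map (fun p => (p.1, (pool.countP (fun rl => pvPick ((cat, terms) :: rest) rl == p.1) : Int))) := by
        apply List.map_congr_left
        intro q hq
        have hqc : q.1 ≠ cat := by
          intro h; apply hca; rw [← h]; exact List.mem_map_of_mem hq
        rw [pick_count_tail cat terms rest pool q.1 hqc]
      rw [← htail, pick_count_tail cat terms rest pool "other" (Ne.symm hco)]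
      simp [List.append_assoc]

-- helper: Set.update adds nothing when every element is already present
theorem set_update_of_mem (l : List String) : ∀ (s : List String), (∀ x ∈ l, x ∈ s) → PySem.Set.update s l = s := by
  induction l with
  | nil => intro s _; rfl
  | cons x xs ih =>
      intro s h
      have hx : PySem.Set.add s x = s := by
        simp [PySem.Set.add, PySem.Set.contains]
        exact h x (by simp)
      show PySem.Set.update (PySem.Set.add s x) xs = s
      rw [hx]
      exact ih s (fun y hy => h y (by simp [hy]))

theorem pick_mem_keys (rl : String) : pvPick pvRules rl ∈ pvInitA.keys := by
  have h := pvPick_mem pvRules rl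
  have : pvRules.map Prod.fst ++ ["other"] = pvInitA.keys := by decide
  rwa [this] at h

theorem a_items (roles : List String) :
    categorize_roles_py roles =
      pvInitA.keys.map (fun k => (k, pvInitA.getD k 0 + (roles.map (fun r => pvPick pvRules (PySem.Str.lower r))).count k)) := by
  unfold categorize_roles_py
  rw [pvStep_eq]
  have hfm : (roles.map (fun r => pvPick pvRules (PySem.Str.lower r))).foldl
        (fun d x => d.modify x 0 (· + 1)) pvInitA
      = roles.foldl (fun d role => d.modify (pvPick pvRules (PySem.Str.lower role)) 0 (· + 1)) pvInitA := by
    rw [List.foldl_map]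
  rw [← hfm]
  set L := roles.map (fun r => pvPick pvRules (PySem.Str.lower r)) with hL
  have hkeys : (L.foldl (fun d x => d.modify x 0 (· + 1)) pvInitA).keys = pvInitA.keys := by
    rw [PySem.Dict.keys_foldl_modify]
    apply set_update_of_mem
    intro x hx
    rw [hL] at hx
    obtain ⟨r, _, hr⟩ := List.mem_map.mp hx
    rw [← hr]; exact pick_mem_keys _
  have hnd : (L.foldl (fun d x => d.modify x 0 (· + 1)) pvInitA).keys.Nodup := by
    rw [hkeys]; decide
  rw [PySem.Dict.items_eq_map_keys _ hnd 0, hkeys]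
  apply List.map_congr_left
  intro k _
  rw [PySem.Dict.getD_foldl_modify_add_one]

theorem count_eq_countP (roles : List String) (k : String) :
    ((roles.map (fun r => pvPick pvRules (PySem.Str.lower r))).count k : Int)
      = ((roles.map (fun r => PySem.Str.lower r)).countP (fun rl => pvPick pvRules rl == k) : Int) := by
  rw [List.count, List.countP_map, List.countP_map]
  rfl

-- ===== VERDICT (by name: the statement is the Claim_ definition above) =====
theorem categorize_roles_py_spec : Claim_equal_categorize_roles_py := by
  intro roles _
  show categorize_roles_py roles = categorize_roles_py_alt roles
  rw [a_items]
  unfold categorize_roles_py_alt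
  rw [cascade_items pvRules (roles.map (fun r => PySem.Str.lower r)) PySem.Dict.empty
        (by decide) (by decide) (by intro k _; simp [PySem.Dict.keys_empty]) (by simp [PySem.Dict.keys_empty])]
  have hie : (PySem.Dict.empty : PySem.Dict String Int).items = [] := rfl
  rw [hie, List.nil_append]
  have hkeys : pvInitA.keys = pvRules.map Prod.fst ++ ["other"] := by decide
  have hgd : ∀ k ∈ pvInitA.keys, pvInitA.getD k 0 = 0 := by decide
  rw [hkeys, List.map_append, List.map_map]
  congr 1
  · apply List.map_congr_left
    intro p hp
    have h0 : pvInitA.getD p.1 0 = 0 := by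
      apply hgd
      rw [hkeys]
      exact List.mem_append_left _ (List.mem_map_of_mem hp)
    simp [Function.comp, h0, count_eq_countP roles p.1]
  · have h0 : pvInitA.getD "other" 0 = 0 := by decide
    simp [h0, count_eq_countP roles "other"]
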